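-- pv_equiv track=rewrite | github.com/jetstream5500/google_code_jam | 2010/qualification/C-Theme_Park/python_solution/c.py | compute_memo
-- ===== SOURCE A (Python) =====
-- def compute_memo(k, groups):
--     memo = []
--     total = 0
--     base_index = 0
--     index = 0
--     while base_index < len(groups):
--         if total + groups[index] > k:
--             memo.append((total, (index-base_index)%len(groups)))
--             total -= groups[base_index]
--             base_index += 1
--         elif total == sum(groups):
--             memo.append((total, len(groups)))
--             total -= groups[base_index]
--             base_index += 1
--         else:
--             total += groups[index]
--             index = (index + 1) % len(groups)
--
--     return memo
-- ===== SOURCE B (Python) =====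
-- def compute_memo(k, groups):
--     n = len(groups)
--     # staged pass 1: prefix-sum table over the doubled group list (models the circular wrap)
--     pref = [0]
--     for g in groups + groups:
--         pref.append(pref[-1] + g)
--     s = pref[n]  # sum of all groups, read off the table
--     # staged pass 2: one absolute end pointer j walks the table; totals are table
--     # differences pref[j] - pref[b] (no running accumulator, no modular index updates)
--     memo = []
--     j = 0
--     for b in range(n):
--         while pref[j] - pref[b] != s and pref[j + 1] - pref[b] <= k:
--             j += 1
--         if pref[j + 1] - pref[b] > k:
--             memo.append((pref[j] - pref[b], (j - b) % n))
--         else: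
--             memo.append((pref[j] - pref[b], n))
--     return memo
-- ===== Notes on version B (the rewrite author's own statement) =====
-- stated objective: faster
-- what changed: B works in two staged passes: it first builds a prefix-sum table over the doubled group list, then for each start moves an absolute end pointer whose window totals are read off as table differences, eliminating A's running accumulator, modular index bookkeeping and the O(n) sum(groups) rescan inside every iteration of its single three-branch while loop.
import Mathlib
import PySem

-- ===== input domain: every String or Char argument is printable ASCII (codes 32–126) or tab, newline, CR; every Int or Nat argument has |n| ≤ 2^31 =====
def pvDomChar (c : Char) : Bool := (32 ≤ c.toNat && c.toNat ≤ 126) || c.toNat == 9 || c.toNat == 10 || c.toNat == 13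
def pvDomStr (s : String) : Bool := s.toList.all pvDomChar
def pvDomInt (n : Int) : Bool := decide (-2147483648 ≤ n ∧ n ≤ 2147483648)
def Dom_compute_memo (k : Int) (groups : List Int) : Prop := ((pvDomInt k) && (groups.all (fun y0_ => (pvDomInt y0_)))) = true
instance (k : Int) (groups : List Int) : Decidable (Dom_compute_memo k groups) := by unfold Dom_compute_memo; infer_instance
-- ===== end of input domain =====

-- B builds a doubled prefix-sum table in a first pass and then reads every window total
-- off the table with an absolute end pointer, removing A's running accumulator, its
-- modular index bookkeeping and its per-iteration sum(groups) rescan (O(n^2) -> O(n));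
-- equality is proved on the whole domain.

-- ===== PORT A =====
-- groups[i]: on every state the loop reaches, i is in range, so pyGetD is exact here.
def pvG (groups : List Int) (i : Int) : Int := PySem.List.pyGetD groups i 0

-- the while loop of A; the fuel argument is only a totality guard, proved sufficient below.
def pvLoopA (k : Int) (groups : List Int) : Nat → List (Int × Int) → Int → Int → Int → List (Int × Int)
  | 0, memo, _, _, _ => memo
  | fuel+1, memo, total, base, index =>
    if base < (groups.length : Int) then
      if total + pvG groups index > k then
        pvLoopA k groups fuel
          (memo ++ [(total, PySem.Int.mod (index - base) (groups.length : Int))])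
          (total - pvG groups base) (base + 1) index
      else if total = groups.sum then
        pvLoopA k groups fuel
          (memo ++ [(total, (groups.length : Int))])
          (total - pvG groups base) (base + 1) index
      else
        pvLoopA k groups fuel memo (total + pvG groups index) base
          (PySem.Int.mod (index + 1) (groups.length : Int))
    else memo

def compute_memo (k : Int) (groups : List Int) : List (Int × Int) :=
  pvLoopA k groups ((groups.length + 1) * (groups.length + 3)) [] 0 0 0

-- ===== PORT B =====
-- pass 1 of Source B: the prefix-sum table (pref[-1] is the Python negative index)
def pvBuildPref (xs : List Int) : List Int :=
  xs.foldl (fun acc g => acc ++ [PySem.List.pyGetD acc (-1) 0 + g]) [0]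

-- the inner 'while pref[j] - pref[b] != s and pref[j+1] - pref[b] <= k' loop of Source B;
-- the fuel argument is only a totality guard, proved sufficient below.
def pvGrowB (k s : Int) (pref : List Int) (b : Int) : Nat → Int → Int
  | 0, j => j
  | fuel+1, j =>
    if PySem.List.pyGetD pref j 0 - PySem.List.pyGetD pref b 0 ≠ s ∧
        PySem.List.pyGetD pref (j + 1) 0 - PySem.List.pyGetD pref b 0 ≤ k then
      pvGrowB k s pref b fuel (j + 1)
    else j

-- the 'for b in range(n)' loop of Source B, carrying the absolute end pointer j across starts
def pvOuterB (k s : Int) (n : Nat) (pref : List Int) : List Nat → List (Int × Int) → Int → List (Int × Int)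
  | [], memo, _ => memo
  | b :: bs, memo, j =>
    match pvGrowB k s pref (b : Int) (2 * n + 1) j with
    | j' =>
      if PySem.List.pyGetD pref (j' + 1) 0 - PySem.List.pyGetD pref (b : Int) 0 > k then
        pvOuterB k s n pref bs
          (memo ++ [(PySem.List.pyGetD pref j' 0 - PySem.List.pyGetD pref (b : Int) 0,
                     PySem.Int.mod (j' - (b : Int)) (n : Int))]) j'
      else
        pvOuterB k s n pref bs
          (memo ++ [(PySem.List.pyGetD pref j' 0 - PySem.List.pyGetD pref (b : Int) 0,
                     (n : Int))]) j'

def compute_memo_alt (k : Int) (groups : List Int) : List (Int × Int) :=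
  let n := groups.length
  let pref := pvBuildPref (groups ++ groups)
  pvOuterB k (PySem.List.pyGetD pref (n : Int) 0) n pref (List.range n) [] 0

-- ===== PRECONDITION & SPEC =====
def Spec_compute_memo (k : Int) (groups : List Int) (out : List (Int × Int)) : Prop :=
  out = compute_memo_alt k groups
instance (k : Int) (groups : List Int) (out : List (Int × Int)) :
    Decidable (Spec_compute_memo k groups out) := by unfold Spec_compute_memo; infer_instance

-- ===== CLAIM (what is proved, stated in full; the proofs are below) =====
def Claim_equal_compute_memo : Prop := ∀ (k : Int) (groups : List Int),
  Dom_compute_memo k groups → Spec_compute_memo k groups (compute_memo k groups)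

-- ===== LEMMAS AND PROOFS =====

-- circular sum of m groups starting at position b
def pvCirc (groups : List Int) (b m : Nat) : Int :=
  ((List.range m).map (fun j => groups.getD ((b + j) % groups.length) 0)).sum

-- prefix sums of groups ++ groups: the value stored at index x of Source B's table
def pvPref (groups : List Int) (x : Nat) : Int := ((groups ++ groups).take x).sum

theorem pvCirc_succ (groups : List Int) (b m : Nat) :
    pvCirc groups b (m + 1) = pvCirc groups b m + groups.getD ((b + m) % groups.length) 0 := by
  simp [pvCirc, List.range_succ]

theorem pvCirc_full (groups : List Int) (hn : 0 < groups.length) (b : Nat) :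
    pvCirc groups b groups.length = groups.sum := by
  have hmap : (List.range groups.length).map
      (fun j => groups.getD ((b + j) % groups.length) 0) = groups.rotate b := by
    apply List.ext_getElem
    · simp
    · intro i h1 h2
      simp only [List.getElem_map, List.getElem_range, List.getElem_rotate]
      rw [List.getD_eq_getElem groups 0 (Nat.mod_lt _ hn)]
      congr 1
      rw [Nat.add_comm b i]
  simp only [pvCirc]
  rw [hmap]
  exact List.Perm.sum_eq (List.rotate_perm groups b)

theorem pvPref_step (gg : List Int) (i : Nat) (hi : i < gg.length) :
    (gg.take (i + 1)).sum = (gg.take i).sum + gg.getD i 0 := by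
  rw [List.sum_take_succ _ _ hi, List.getD_eq_getElem gg 0 hi]

theorem pvGG_getD (groups : List Int) (i : Nat)
    (hi : i < 2 * groups.length) :
    (groups ++ groups).getD i 0 = groups.getD (i % groups.length) 0 := by
  rcases Nat.lt_or_ge i groups.length with h | h
  · rw [List.getD_append _ _ _ _ h, Nat.mod_eq_of_lt h]
  · have h2 : i - groups.length < groups.length := by omega
    have hmod : i % groups.length = i - groups.length := by
      rw [Nat.mod_eq_sub_mod h, Nat.mod_eq_of_lt h2]
    rw [List.getD_append_right _ _ _ _ h, hmod]

theorem pvPref_succ (groups : List Int) (x : Nat) (hx : x < 2 * groups.length) :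
    pvPref groups (x + 1) = pvPref groups x + groups.getD (x % groups.length) 0 := by
  unfold pvPref
  rw [pvPref_step _ _ (by simp only [List.length_append]; omega), pvGG_getD groups x hx]

theorem pvPref_sub (groups : List Int) (b : Nat)
    (hb : b < groups.length) : ∀ (m : Nat), m ≤ groups.length →
    pvPref groups (b + m) - pvPref groups b = pvCirc groups b m := by
  intro m
  induction m with
  | zero => intro _; simp [pvCirc]
  | succ m ih =>
    intro hm
    have hm' : m ≤ groups.length := by omega
    rw [← Nat.add_assoc, pvPref_succ _ _ (by omega), pvCirc_succ]
    have := ih hm'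
    omega

theorem pvPref_full (groups : List Int) (b : Nat) (hb : b < groups.length) :
    pvPref groups (b + groups.length) - pvPref groups b = groups.sum := by
  rw [pvPref_sub groups b hb groups.length (le_refl _),
    pvCirc_full groups (by omega) b]

theorem pvMul_expand (n b : Nat) (hb : b < n) :
    (n - b) * (n + 2) = (n - (b + 1)) * (n + 2) + (n + 2) := by
  have h : n - b = (n - (b + 1)) + 1 := by omega
  rw [h, Nat.succ_mul]

-- A's index update (index + 1) % n tracks the absolute pointer j + 1
theorem pvIdxStep (j n : Nat) (hn : 0 < n) :
    PySem.Int.mod (((j % n : Nat) : Int) + 1) ((n : Nat) : Int) = (((j + 1) % n : Nat) : Int) := by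
  have e1 : (((j % n : Nat)) : Int) + 1 = (((j % n + 1 : Nat)) : Int) := by push_cast; ring
  rw [e1, PySem.Int.mod_eq_emod_of_pos (by exact_mod_cast hn), ← Int.natCast_mod]
  congr 1
  conv_rhs => rw [Nat.add_mod j 1]
  conv_lhs => rw [Nat.add_mod (j % n) 1, Nat.mod_mod_of_dvd _ dvd_rfl]

-- A's appended count (index - base) % n equals Source B's (j - b) % n
theorem pvCount_eq (j b n : Nat) (hn : 0 < n) :
    PySem.Int.mod (((j % n : Nat) : Int) - (b : Int)) ((n : Nat) : Int)
      = PySem.Int.mod ((j : Int) - (b : Int)) ((n : Nat) : Int) := by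
  rw [PySem.Int.mod_eq_emod_of_pos (by exact_mod_cast hn),
    PySem.Int.mod_eq_emod_of_pos (by exact_mod_cast hn)]
  have e1 : ((j % n : Nat) : Int) = (j : Int) % (n : Int) := by push_cast; ring
  rw [e1, Int.sub_emod ((j : Int) % n) b, Int.emod_emod_of_dvd _ dvd_rfl, ← Int.sub_emod]

-- Source B's table is exactly the list of prefix sums of its input
theorem pvBuildPref_eq (xs : List Int) :
    pvBuildPref xs = (List.range (xs.length + 1)).map (fun i => (xs.take i).sum) := by
  induction xs using List.reverseRecOn with
  | nil => simp [pvBuildPref]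
  | append_singleton ys y ih =>
    unfold pvBuildPref at *
    rw [List.foldl_append, ih]
    simp only [List.foldl_cons, List.foldl_nil, List.length_append, List.length_singleton]
    have hlast : PySem.List.pyGetD
        ((List.range (ys.length + 1)).map (fun i => (ys.take i).sum)) (-1) 0 = ys.sum := by
      have h1 : (List.range (ys.length + 1)).map (fun i => (ys.take i).sum)
          = (List.range ys.length).map (fun i => (ys.take i).sum) ++ [(ys.take ys.length).sum] := by
        rw [List.range_succ, List.map_append]; rfl
      rw [h1, PySem.List.pyGetD_neg_one_append_singleton, List.take_length]
    rw [hlast]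
    rw [List.range_succ (n := ys.length + 1), List.map_append]
    congr 1
    · apply List.map_congr_left
      intro i hi
      rw [List.mem_range] at hi
      rw [List.take_append_of_le_length (by omega)]
    · have htake : (ys ++ [y]).take (ys.length + 1) = ys ++ [y] :=
        List.take_of_length_le (by simp)
      simp [htake]

-- reading Source B's table at a Nat index within range
theorem pvPrefGet (groups : List Int) (x : Nat) (hx : x ≤ 2 * groups.length) :
    PySem.List.pyGetD (pvBuildPref (groups ++ groups)) ((x : Nat) : Int) 0 = pvPref groups x := by
  rw [PySem.List.pyGetD_natCast, pvBuildPref_eq]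
  have hlen : (groups ++ groups).length + 1 = 2 * groups.length + 1 := by
    simp [List.length_append]; omega
  rw [List.getD_eq_getElem _ 0 (by simp [List.length_append]; omega)]
  simp [pvPref]

-- the grow loop returns its pointer unchanged when the continue condition fails
theorem pvGrowB_stop (k s : Int) (pref : List Int) (b : Int) (f : Nat) (j : Int)
    (hcond : ¬(PySem.List.pyGetD pref j 0 - PySem.List.pyGetD pref b 0 ≠ s ∧
        PySem.List.pyGetD pref (j + 1) 0 - PySem.List.pyGetD pref b 0 ≤ k)) :
    pvGrowB k s pref b f j = j := by
  cases f with
  | zero => rfl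
  | succ f => rw [pvGrowB, if_neg hcond]

-- the grow loop's result does not depend on the fuel once the fuel covers the remaining room
theorem pvGrowB_fuel (k : Int) (groups : List Int) (b : Nat) (hb : b < groups.length) :
    ∀ (d f1 f2 j : Nat), j ≤ b + groups.length →
    b + groups.length - j ≤ d → d ≤ f1 → d ≤ f2 →
    pvGrowB k groups.sum (pvBuildPref (groups ++ groups)) (b : Int) f1 (j : Int)
      = pvGrowB k groups.sum (pvBuildPref (groups ++ groups)) (b : Int) f2 (j : Int) := by
  intro d
  induction d with
  | zero =>
    intro f1 f2 j hj hd _ _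
    have hjeq : j = b + groups.length := by omega
    have hcond : ¬(PySem.List.pyGetD (pvBuildPref (groups ++ groups)) ((j : Nat) : Int) 0
        - PySem.List.pyGetD (pvBuildPref (groups ++ groups)) ((b : Nat) : Int) 0 ≠ groups.sum ∧
        PySem.List.pyGetD (pvBuildPref (groups ++ groups)) (((j : Nat) : Int) + 1) 0
        - PySem.List.pyGetD (pvBuildPref (groups ++ groups)) ((b : Nat) : Int) 0 ≤ k) := by
      intro ⟨h1, _⟩
      apply h1
      rw [pvPrefGet groups j (by omega), pvPrefGet groups b (by omega), hjeq]
      exact pvPref_full groups b hb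
    rw [pvGrowB_stop _ _ _ _ _ _ hcond, pvGrowB_stop _ _ _ _ _ _ hcond]
  | succ d ih =>
    intro f1 f2 j hj hd h1 h2
    by_cases hcond : (PySem.List.pyGetD (pvBuildPref (groups ++ groups)) ((j : Nat) : Int) 0
        - PySem.List.pyGetD (pvBuildPref (groups ++ groups)) ((b : Nat) : Int) 0 ≠ groups.sum ∧
        PySem.List.pyGetD (pvBuildPref (groups ++ groups)) (((j : Nat) : Int) + 1) 0
        - PySem.List.pyGetD (pvBuildPref (groups ++ groups)) ((b : Nat) : Int) 0 ≤ k)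
    · have hjlt : j < b + groups.length := by
        rcases Nat.eq_or_lt_of_le hj with h | h
        · exfalso
          apply hcond.1
          rw [pvPrefGet groups j (by omega), pvPrefGet groups b (by omega), h]
          exact pvPref_full groups b hb
        · omega
      obtain ⟨f1, rfl⟩ : ∃ f, f1 = f + 1 := ⟨f1 - 1, by omega⟩
      obtain ⟨f2, rfl⟩ : ∃ f, f2 = f + 1 := ⟨f2 - 1, by omega⟩
      rw [pvGrowB, pvGrowB, if_pos hcond, if_pos hcond]
      have hcast : ((j : Nat) : Int) + 1 = ((j + 1 : Nat) : Int) := by push_cast; ring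
      rw [hcast]
      exact ih f1 f2 (j + 1) (by omega) (by omega) (by omega) (by omega)
    · rw [pvGrowB_stop _ _ _ _ _ _ hcond, pvGrowB_stop _ _ _ _ _ _ hcond]

-- a step of Source B's grow loop rewritten inside the per-start loop
theorem pvOuterB_congr (k s : Int) (n : Nat) (pref : List Int) (b : Nat) (bs : List Nat)
    (memo : List (Int × Int)) (j1 j2 : Int)
    (h : pvGrowB k s pref (b : Int) (2 * n + 1) j1 = pvGrowB k s pref (b : Int) (2 * n + 1) j2) :
    pvOuterB k s n pref (b :: bs) memo j1 = pvOuterB k s n pref (b :: bs) memo j2 := by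
  conv_lhs => rw [pvOuterB]
  conv_rhs => rw [pvOuterB]
  rw [h]

-- the bisimulation: A's three-branch loop and Source B's table scan walk the same
-- window-end pointer and append the same entries
theorem pvSim (k : Int) (groups : List Int) :
    ∀ (fuelA : Nat) (b j : Nat) (acc : List (Int × Int)) (total : Int),
    b ≤ groups.length → j ≤ b + groups.length →
    total = pvPref groups j - pvPref groups b →
    (groups.length - b) * (groups.length + 2) + (groups.length + b - j) + 1 ≤ fuelA →
    pvLoopA k groups fuelA acc total (b : Int) (((j % groups.length : Nat)) : Int)
      = pvOuterB k groups.sum groups.length (pvBuildPref (groups ++ groups))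
          (List.range' b (groups.length - b)) acc (j : Int) := by
  intro fuelA
  induction fuelA with
  | zero => intro b j acc total _ _ _ hf; omega
  | succ fuelA ih =>
    intro b j acc total hb hj htotal hf
    rcases Nat.eq_or_lt_of_le hb with hbn | hblt
    · -- b = n: both loops are done
      rw [pvLoopA, if_neg (by rw [hbn]; omega), hbn]
      simp [pvOuterB]
    · have hn : 0 < groups.length := by omega
      have hKexp := pvMul_expand groups.length b hblt
      have hj2n : j < 2 * groups.length := by omega
      have hrange : List.range' b (groups.length - b)
          = b :: List.range' (b + 1) (groups.length - (b + 1)) := by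
        have h : groups.length - b = (groups.length - (b + 1)) + 1 := by omega
        rw [h, List.range'_succ]
      have hgb : pvG groups ((b : Nat) : Int) = groups.getD b 0 := by
        simp only [pvG, PySem.List.pyGetD_natCast]
      have hgi : pvG groups (((j % groups.length : Nat)) : Int)
          = groups.getD (j % groups.length) 0 := by
        simp only [pvG, PySem.List.pyGetD_natCast]
      have hPj := pvPrefGet groups j (by omega)
      have hPj1 : PySem.List.pyGetD (pvBuildPref (groups ++ groups)) (((j : Nat) : Int) + 1) 0
          = pvPref groups (j + 1) := by
        have hcast : ((j : Nat) : Int) + 1 = ((j + 1 : Nat) : Int) := by push_cast; ring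
        rw [hcast]; exact pvPrefGet groups (j + 1) (by omega)
      have hPb := pvPrefGet groups b (by omega)
      have hstep : pvPref groups (j + 1) = pvPref groups j + groups.getD (j % groups.length) 0 :=
        pvPref_succ groups j hj2n
      have hbs : ((b : Int) + 1) = ((b + 1 : Nat) : Int) := by push_cast; ring
      have hprefb : pvPref groups (b + 1) = pvPref groups b + groups.getD b 0 := by
        rw [pvPref_succ groups b (by omega), Nat.mod_eq_of_lt hblt]
      set gi := groups.getD (j % groups.length) 0 with hgidef
      rw [pvLoopA, if_pos (by exact_mod_cast hblt)]
      split_ifs with h1 h2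
      · -- A records an overflow stop; Source B's scan stops at once and records the same
        rw [hgi] at h1
        have hstop : pvGrowB k groups.sum (pvBuildPref (groups ++ groups)) (b : Int)
            (2 * groups.length + 1) (j : Int) = (j : Int) := by
          rw [pvGrowB, if_neg (by intro ⟨_, hc⟩; rw [hPj1, hPb, hstep] at hc; omega)]
        rw [hrange]
        conv_rhs => rw [pvOuterB, hstop]
        rw [hPj1, hPb, hstep, if_pos (by omega), hPj, pvCount_eq j b groups.length hn]
        have hval : pvPref groups j - pvPref groups b = total := htotal.symm
        rw [hval, hgb, hbs]
        exact ih (b + 1) j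
          (acc ++ [(total, PySem.Int.mod ((j : Int) - (b : Int)) (groups.length : Int))])
          (total - groups.getD b 0) (by omega) (by omega) (by omega) (by omega)
      · -- A records an all-fit stop (total = sum); Source B's scan stops for the same reason
        rw [hgi] at h1
        have hstop : pvGrowB k groups.sum (pvBuildPref (groups ++ groups)) (b : Int)
            (2 * groups.length + 1) (j : Int) = (j : Int) := by
          rw [pvGrowB, if_neg (by intro ⟨hc, _⟩; rw [hPj, hPb] at hc; omega)]
        rw [hrange]
        conv_rhs => rw [pvOuterB, hstop]
        rw [hPj1, hPb, hstep, if_neg (by omega), hPj]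
        have hval : pvPref groups j - pvPref groups b = total := htotal.symm
        rw [hval, hgb, hbs]
        exact ih (b + 1) j
          (acc ++ [(total, (groups.length : Int))])
          (total - groups.getD b 0) (by omega) (by omega) (by omega) (by omega)
      · -- both sides advance the window end past groups[j % n]
        rw [hgi] at h1
        have hjlt : j < b + groups.length := by
          rcases Nat.eq_or_lt_of_le hj with h | h
          · exfalso
            rw [h, pvPref_full groups b hblt] at htotal
            exact h2 htotal
          · omega
        have hcast1 : ((j : Int) + 1) = ((j + 1 : Nat) : Int) := by push_cast; ring
        have hgrow : pvGrowB k groups.sum (pvBuildPref (groups ++ groups)) (b : Int)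
            (2 * groups.length + 1) (j : Int)
            = pvGrowB k groups.sum (pvBuildPref (groups ++ groups)) (b : Int)
              (2 * groups.length + 1) ((j + 1 : Nat) : Int) := by
          rw [pvGrowB, if_pos ⟨by rw [hPj, hPb]; omega, by rw [hPj1, hPb, hstep]; omega⟩,
            hcast1]
          exact pvGrowB_fuel k groups b hblt (b + groups.length - (j + 1))
            (2 * groups.length) (2 * groups.length + 1) (j + 1)
            (by omega) (by omega) (by omega) (by omega)
        rw [hrange, pvOuterB_congr k groups.sum groups.length (pvBuildPref (groups ++ groups))
          b _ acc (j : Int) ((j + 1 : Nat) : Int) hgrow, ← hrange]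
        rw [hgi, pvIdxStep j groups.length hn]
        exact ih b (j + 1) acc (total + gi) hb (by omega)
          (by rw [hstep]; omega) (by omega)

theorem pvAB (k : Int) (groups : List Int) :
    compute_memo k groups = compute_memo_alt k groups := by
  unfold compute_memo compute_memo_alt
  simp only
  have hs : PySem.List.pyGetD (pvBuildPref (groups ++ groups)) ((groups.length : Nat) : Int) 0
      = groups.sum := by
    rw [pvPrefGet groups groups.length (by omega)]
    simp [pvPref]
  rw [hs, List.range_eq_range']
  have h := pvSim k groups ((groups.length + 1) * (groups.length + 3)) 0 0 [] 0
    (Nat.zero_le _) (by omega) (by simp [pvPref])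
    (by
      simp only [Nat.sub_zero, Nat.add_zero]
      have hexp : (groups.length + 1) * (groups.length + 3)
          = groups.length * (groups.length + 2) + (2 * groups.length + 3) := by ring
      omega)
  simpa using h

-- ===== VERDICT (by name: the statement is the Claim_ definition above) =====
theorem compute_memo_spec : Claim_equal_compute_memo := by
  intro k groups _
  unfold Spec_compute_memo
  exact pvAB k groups
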